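-- pv_equiv track=rewrite | github.com/sampazdan/LEAdgeKit | db_receive.py | detect_high_to_low
-- ===== SOURCE A (Python) =====
-- def detect_high_to_low(byte, prev):
--     #Check incoming byte against previous to detect changes using XOR
--     change = byte ^ prev
--     #BITWISE check for cliffs across entire byte (all 6 inputs) using AND
--     high_to_low = change & prev
--
--     #Method storage for device ids of triggered devices
--     devicesTriggered = []
--
--     #If no cliffs detected for any inputs then return empty array
--     if high_to_low == 0:
--         return devicesTriggered
--     #Cliffs detected, then find and return array of specifically affected inputs
--     else:
--         #For all inputs
--         for i in range(0,8):
--             #BITWISE calc for specific input to determine if change is FALL OFF cliff at END of trigger cycle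
--             if high_to_low & (2 ** i):
--                 #Store device Id for output
--                 devicesTriggered.append(i)
--         #Return ID list of triggered devices
--         return devicesTriggered
-- ===== SOURCE B (Python) =====
-- def detect_high_to_low(byte, prev):
--     # Walk only the set bits of the masked high-to-low word, lowest first.
--     x = ((byte ^ prev) & prev) & 0xFF
--     out = []
--     while x:
--         rest = x & (x - 1)          # clear the lowest set bit
--         out.append((x ^ rest).bit_length() - 1)  # its index
--         x = rest
--     return out
-- ===== Notes on version B (the rewrite author's own statement) =====
-- stated objective: alternative
-- what changed: Instead of testing all 8 bit positions of the high-to-low word, B masks it to a byte once and walks only its set bits with a clear-lowest-bit loop (rest = x & (x-1)), reading each index off with bit_length.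
import Mathlib
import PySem

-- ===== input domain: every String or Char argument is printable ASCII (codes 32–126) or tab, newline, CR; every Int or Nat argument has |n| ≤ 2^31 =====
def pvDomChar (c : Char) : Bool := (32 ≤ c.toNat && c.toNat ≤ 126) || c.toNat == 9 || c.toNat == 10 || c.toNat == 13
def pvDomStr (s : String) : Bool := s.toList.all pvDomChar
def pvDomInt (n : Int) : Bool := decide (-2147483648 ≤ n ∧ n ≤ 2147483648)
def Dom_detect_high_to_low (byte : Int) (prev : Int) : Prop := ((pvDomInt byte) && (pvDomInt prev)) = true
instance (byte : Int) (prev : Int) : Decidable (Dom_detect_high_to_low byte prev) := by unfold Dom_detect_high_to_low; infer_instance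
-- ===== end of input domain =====

-- B re-implements A by walking only the set bits of the masked high-to-low word
-- (clear-lowest-bit loop) instead of testing all 8 positions; same return value.

-- ===== PORT A =====
-- Python '^' and '&' on ints are Int.xor / Int.land (two's-complement, exact);
-- '2 ** i' for i drawn from range(0,8) is (2:Int) ^ i.toNat (exact: i ≥ 0);
-- 'if high_to_low & (2 ** i):' is truthiness, i.e. ≠ 0.
def detect_high_to_low (byte : Int) (prev : Int) : List Int :=
  let change := Int.xor byte prev
  let high_to_low := Int.land change prev
  let devicesTriggered : List Int := []
  if high_to_low = 0 then devicesTriggered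
  else
    (PySem.List.pyRange 0 8 1).foldl
      (fun acc i => if Int.land high_to_low ((2 : Int) ^ i.toNat) ≠ 0 then acc ++ [i] else acc)
      devicesTriggered

-- ===== PORT B =====
-- int.bit_length ported step for step (halving loop); fuel 9 is a totality guard
-- only: the argument is below 2^9 here, so the fuel is never exhausted.
def pvBitLen : Nat → Nat → Nat
  | 0, _ => 0
  | fuel + 1, x => if x = 0 then 0 else pvBitLen fuel (x / 2) + 1

-- the while loop of Source B; fuel 9 is a totality guard only: x < 256 has at most
-- 8 set bits, so the loop runs at most 8 times.
def pvAltGo : Nat → Nat → List Int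
  | 0, _ => []
  | fuel + 1, x =>
    if x = 0 then []
    else
      let rest := x &&& (x - 1)
      ((pvBitLen 9 (x ^^^ rest) - 1 : Nat) : Int) :: pvAltGo fuel rest

-- 'x & 0xFF' makes the Python value a nonnegative int < 256, so the Nat view
-- via .toNat is exact.
def detect_high_to_low_alt (byte : Int) (prev : Int) : List Int :=
  pvAltGo 9 ((Int.land (Int.land (Int.xor byte prev) prev) 255).toNat)

-- ===== PRECONDITION & SPEC =====
def Spec_detect_high_to_low (byte : Int) (prev : Int) (out : List Int) : Prop := out = detect_high_to_low_alt byte prev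
instance (byte : Int) (prev : Int) (out : List Int) : Decidable (Spec_detect_high_to_low byte prev out) := by unfold Spec_detect_high_to_low; infer_instance

-- ===== CLAIM (what is proved, stated in full; the proofs are below) =====
def Claim_equal_detect_high_to_low : Prop := ∀ (byte : Int) (prev : Int), Dom_detect_high_to_low byte prev → Spec_detect_high_to_low byte prev (detect_high_to_low byte prev)

-- ===== LEMMAS AND PROOFS =====

-- bits of 255 = 2^8 - 1
theorem pv_testBit_255 (j : Nat) : (255 : Nat).testBit j = decide (j < 8) := by
  have h : (255 : Nat) = 2 ^ 8 - 1 := by norm_num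
  rw [h, Nat.testBit_two_pow_sub_one]

-- h &&& 255 (Python) is a natural number a < 256 agreeing with h on bits 0..7
theorem pv_land255 (h : Int) :
    ∃ a : Nat, a < 256 ∧ Int.land h 255 = (a : Int) ∧
      ∀ i : Nat, i < 8 → h.testBit i = a.testBit i := by
  cases h with
  | ofNat n =>
    refine ⟨n % 256, Nat.mod_lt _ (by norm_num), ?_, ?_⟩
    · show Int.ofNat (n &&& 255) = Int.ofNat (n % 256)
      have : n &&& 255 = n % 256 := by
        have := Nat.and_two_pow_sub_one_eq_mod n 8
        norm_num at this
        exact this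
      rw [this]
    · intro i hi
      show n.testBit i = (n % 256).testBit i
      have h256 : (256 : Nat) = 2 ^ 8 := by norm_num
      rw [h256, Nat.testBit_mod_two_pow]
      simp [hi]
  | negSucc n =>
    refine ⟨Nat.ldiff 255 n, ?_, rfl, ?_⟩
    · have hle : Nat.ldiff 255 n = 255 &&& Nat.ldiff 255 n := by
        apply Nat.eq_of_testBit_eq
        intro j
        rw [Nat.testBit_and, Nat.testBit_ldiff, pv_testBit_255]
        by_cases hj : j < 8 <;> simp [hj]
      calc Nat.ldiff 255 n = 255 &&& Nat.ldiff 255 n := hle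
        _ ≤ 255 := Nat.and_le_left
        _ < 256 := by norm_num
    · intro i hi
      show (!n.testBit i) = (Nat.ldiff 255 n).testBit i
      rw [Nat.testBit_ldiff, pv_testBit_255]
      simp [hi]

-- Nat: ldiff of a power of two against n extracts (the complement of) one bit
theorem pv_ldiff_two_pow (k n : Nat) :
    Nat.ldiff (2 ^ k) n = (!n.testBit k).toNat * 2 ^ k := by
  apply Nat.eq_of_testBit_eq
  intro j
  rw [Nat.testBit_ldiff, Nat.testBit_two_pow]
  cases hb : n.testBit k with
  | true =>
    simp only [Bool.not_true, Bool.toNat_false, Nat.zero_mul, Nat.zero_testBit]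
    by_cases hkj : k = j
    · subst hkj; simp [hb]
    · simp [hkj]
  | false =>
    simp only [Bool.not_false, Bool.toNat_true, Nat.one_mul, Nat.testBit_two_pow]
    by_cases hkj : k = j
    · subst hkj; simp [hb]
    · simp [hkj]

-- Int: h & 2^k isolates bit k
theorem pv_int_and_two_pow (h : Int) (k : Nat) :
    Int.land h ((2 : Int) ^ k) = Int.ofNat ((h.testBit k).toNat * 2 ^ k) := by
  have hpow : (2 : Int) ^ k = Int.ofNat (2 ^ k) := by rfl
  rw [hpow]
  cases h with
  | ofNat n =>
    show Int.ofNat (n &&& 2 ^ k) = _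
    rw [Nat.and_two_pow]
    rfl
  | negSucc n =>
    show Int.ofNat (Nat.ldiff (2 ^ k) n) = _
    rw [pv_ldiff_two_pow]
    rfl

theorem pv_cond_testBit (h : Int) (k : Nat) :
    (Int.land h ((2 : Int) ^ k) ≠ 0) ↔ h.testBit k = true := by
  rw [pv_int_and_two_pow]
  cases hb : h.testBit k <;> simp

-- the 8-position scan and the clear-lowest-bit loop agree on every byte value
set_option maxRecDepth 10000 in
theorem pv_key : ∀ v : Fin 256,
    List.foldl (fun (acc : List Int) (i : Int) =>
        if Nat.testBit v.val i.toNat then acc ++ [i] else acc)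
      [] [0, 1, 2, 3, 4, 5, 6, 7] = pvAltGo 9 v.val := by
  decide

-- ===== VERDICT (by name: the statement is the Claim_ definition above) =====
theorem detect_high_to_low_spec : Claim_equal_detect_high_to_low := by
  intro byte prev _
  unfold Spec_detect_high_to_low detect_high_to_low detect_high_to_low_alt
  obtain ⟨a, ha, heq, hbits⟩ := pv_land255 (Int.land (Int.xor byte prev) prev)
  rw [heq, Int.toNat_natCast]
  by_cases h0 : Int.land (Int.xor byte prev) prev = 0
  · rw [if_pos h0]
    rw [h0] at heq
    have ha0 : a = 0 := by
      have : (0 : Int) = (a : Int) := by rw [← heq]; rfl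
      exact_mod_cast this.symm
    rw [ha0]
    rfl
  · rw [if_neg h0]
    rw [show PySem.List.pyRange 0 8 1 = [0, 1, 2, 3, 4, 5, 6, 7] from by decide]
    have hc : ∀ k : Nat, k < 8 → ∀ acc : List Int, ∀ i : Int,
        (if Int.land (Int.land (Int.xor byte prev) prev) ((2 : Int) ^ k) ≠ 0
          then acc ++ [i] else acc)
        = (if a.testBit k then acc ++ [i] else acc) := by
      intro k hk acc i
      apply if_congr _ rfl rfl
      rw [pv_cond_testBit, hbits k hk]
    have hext : ∀ acc : List Int, ∀ i ∈ ([0, 1, 2, 3, 4, 5, 6, 7] : List Int),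
        (if Int.land (Int.land (Int.xor byte prev) prev) ((2 : Int) ^ i.toNat) ≠ 0
          then acc ++ [i] else acc)
        = (if Nat.testBit a i.toNat then acc ++ [i] else acc) := by
      intro acc i hi
      simp only [List.mem_cons, List.not_mem_nil, or_false] at hi
      rcases hi with rfl | rfl | rfl | rfl | rfl | rfl | rfl | rfl
      exacts [hc 0 (by omega) acc 0, hc 1 (by omega) acc 1, hc 2 (by omega) acc 2,
        hc 3 (by omega) acc 3, hc 4 (by omega) acc 4, hc 5 (by omega) acc 5,
        hc 6 (by omega) acc 6, hc 7 (by omega) acc 7]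
    rw [List.foldl_ext _ _ _ hext]
    exact pv_key ⟨a, ha⟩
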